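-- pv_equiv track=rewrite | github.com/wannabetter/LeetCode | 982.py | countTriplets
-- ===== SOURCE A (Python) =====
-- from typing import List
-- from collections import Counter
--
-- def countTriplets(nums: List[int]) -> int:
--     res = 0
--     cnt = Counter(x & y for x in nums for y in nums)
--
--     for z in nums:
--         for mask, freq in cnt.items():
--             if z & mask == 0:
--                 res += freq
--
--     return res
-- ===== SOURCE B (Python) =====
-- def countTriplets(nums):
--     # Direct one-line count of all (x, y, z) triples whose bitwise AND is zero.
--     return sum(1 for x in nums for y in nums for z in nums if x & y & z == 0)
-- ===== Notes on version B (the rewrite author's own statement) =====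
-- stated objective: simpler
-- what changed: Replaced the Counter of pairwise ANDs plus per-element counter scan by a direct one-line count over all triples; no intermediate counter data structure.
import Mathlib
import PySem

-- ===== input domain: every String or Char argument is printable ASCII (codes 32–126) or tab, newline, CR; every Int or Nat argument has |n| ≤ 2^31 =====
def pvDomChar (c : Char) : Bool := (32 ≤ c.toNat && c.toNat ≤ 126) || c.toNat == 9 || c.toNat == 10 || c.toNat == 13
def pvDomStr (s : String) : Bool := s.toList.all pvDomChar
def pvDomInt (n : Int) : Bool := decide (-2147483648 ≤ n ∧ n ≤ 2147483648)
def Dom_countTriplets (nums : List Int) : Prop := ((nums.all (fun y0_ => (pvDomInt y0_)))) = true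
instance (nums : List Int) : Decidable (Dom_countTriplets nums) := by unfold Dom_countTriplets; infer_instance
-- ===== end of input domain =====

-- B replaces A's Counter of pairwise ANDs plus per-element counter scan by a direct
-- one-line count over all triples (simpler; not faster).

-- ===== PORT A =====
def countTriplets (nums : List Int) : Int :=
  let cnt := PySem.Dict.counter (nums.flatMap (fun x => nums.map (fun y => PySem.Int.band x y)))
  nums.foldl (fun res z =>
    cnt.items.foldl (fun res mf =>
      if PySem.Int.band z mf.1 = 0 then res + mf.2 else res) res) 0

-- ===== PORT B =====
def countTriplets_alt (nums : List Int) : Int :=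
  (nums.flatMap (fun x => nums.flatMap (fun y => nums.map (fun z =>
      if PySem.Int.band (PySem.Int.band x y) z = 0 then (1 : Int) else 0)))).sum

-- ===== PRECONDITION & SPEC =====
def Spec_countTriplets (nums : List Int) (out : Int) : Prop := out = countTriplets_alt nums
instance (nums : List Int) (out : Int) : Decidable (Spec_countTriplets nums out) := by unfold Spec_countTriplets; infer_instance

-- ===== CLAIM (what is proved, stated in full; the proofs are below) =====
def Claim_equal_countTriplets : Prop := ∀ (nums : List Int), Dom_countTriplets nums → Spec_countTriplets nums (countTriplets nums)

-- ===== LEMMAS AND PROOFS =====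

lemma pv_sum_flatMap {α : Type} (l : List α) (f : α → List Int) :
    (l.flatMap f).sum = (l.map (fun a => (f a).sum)).sum := by
  induction l with
  | nil => simp
  | cons a l ih => simp [ih]

lemma pv_sum_comm {α β : Type} (l : List α) (m : List β) (f : α → β → Int) :
    (l.map (fun a => (m.map (fun b => f a b)).sum)).sum
      = (m.map (fun b => (l.map (fun a => f a b)).sum)).sum := by
  induction l with
  | nil => simp
  | cons a l ih => simp [ih]

lemma pv_sum_indicator (S : List Int) (p : Int → Prop) [DecidablePred p] :
    ∀ (a : Int), S.Nodup → a ∈ S →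
      (S.map (fun k => if p k ∧ k = a then (1 : Int) else 0)).sum
        = if p a then 1 else 0 := by
  induction S with
  | nil => intro a _ ha; cases ha
  | cons b S ih =>
    intro a hnd ha
    rcases List.nodup_cons.mp hnd with ⟨hbS, hS⟩
    rcases List.mem_cons.mp ha with h | haS
    · subst h
      rw [List.map_cons, List.sum_cons]
      rw [List.sum_eq_zero (by
        intro x hx
        rcases List.mem_map.mp hx with ⟨k, hk, rfl⟩
        have hne : k ≠ a := fun e => hbS (e ▸ hk)
        simp [hne])]
      simp
    · have hba : b ≠ a := fun e => hbS (e ▸ haS)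
      rw [List.map_cons, List.sum_cons, ih a hS haS]
      simp [hba]

lemma pv_sum_count (L S : List Int) (p : Int → Prop) [DecidablePred p]
    (hS : S.Nodup) (hsub : ∀ a ∈ L, a ∈ S) :
    (S.map (fun k => if p k then (L.count k : Int) else 0)).sum
      = (L.map (fun a => if p a then (1 : Int) else 0)).sum := by
  induction L with
  | nil => simp
  | cons a L ih =>
    have hsplit : ∀ k : Int, (if p k then ((a :: L).count k : Int) else 0)
        = (if p k then (L.count k : Int) else 0) + (if p k ∧ k = a then (1 : Int) else 0) := by
      intro k
      by_cases hp : p k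
      · by_cases hk : k = a
        · subst hk; simp [hp]
        · simp [hp, hk, Ne.symm hk]
      · simp [hp]
    calc (S.map (fun k => if p k then ((a :: L).count k : Int) else 0)).sum
        = (S.map (fun k => (if p k then (L.count k : Int) else 0)
            + (if p k ∧ k = a then (1 : Int) else 0))).sum :=
          congrArg List.sum (List.map_congr_left (fun k _ => hsplit k))
      _ = (S.map (fun k => if p k then (L.count k : Int) else 0)).sum
            + (S.map (fun k => if p k ∧ k = a then (1 : Int) else 0)).sum :=
          PySem.List.sum_map_add_int S _ _
      _ = (L.map (fun a => if p a then (1 : Int) else 0)).sum + (if p a then 1 else 0) := by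
          rw [ih (fun x hx => hsub x (by simp [hx])),
            pv_sum_indicator S p a hS (hsub a (by simp))]
      _ = ((a :: L).map (fun a => if p a then (1 : Int) else 0)).sum := by
          rw [List.map_cons, List.sum_cons]; ring

-- ===== VERDICT (by name: the statement is the Claim_ definition above) =====

set_option maxHeartbeats 1000000 in
theorem countTriplets_spec : Claim_equal_countTriplets := by
  intro nums _
  unfold Spec_countTriplets
  simp only [countTriplets, countTriplets_alt]
  set P := nums.flatMap (fun x => nums.map (fun y => PySem.Int.band x y)) with hP
  -- the inner loop over the counter's items sums the admitted frequencies
  have hfold : ∀ (z : Int) (L : List (Int × Int)) (r : Int),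
      L.foldl (fun res mf => if PySem.Int.band z mf.1 = 0 then res + mf.2 else res) r
        = r + (L.map (fun mf => if PySem.Int.band z mf.1 = 0 then mf.2 else 0)).sum := by
    intro z L
    induction L with
    | nil => intro r; simp
    | cons mf L ih =>
      intro r
      by_cases h : PySem.Int.band z mf.1 = 0 <;>
        simp [List.foldl_cons, h, ih, add_assoc]
  simp only [hfold]
  -- the frequency-weighted sum over distinct masks is the plain sum over all pairs
  have hS : ∀ z : Int,
      ((PySem.Dict.counter P).items.map
          (fun mf => if PySem.Int.band z mf.1 = 0 then mf.2 else 0)).sum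
        = (P.map (fun k => if PySem.Int.band z k = 0 then (1 : Int) else 0)).sum := by
    intro z
    rw [PySem.Dict.items_counter, List.map_map]
    rw [show ((PySem.Set.ofList P).map
          ((fun mf : Int × Int => if PySem.Int.band z mf.1 = 0 then mf.2 else 0)
            ∘ (fun k => (k, (P.count k : Int)))))
        = (PySem.Set.ofList P).map
            (fun k => if PySem.Int.band z k = 0 then (P.count k : Int) else 0) from
      List.map_congr_left (fun k _ => rfl)]
    exact pv_sum_count P (PySem.Set.ofList P) (fun k => PySem.Int.band z k = 0)
      (PySem.Set.nodup_ofList P) (fun a ha => (PySem.Set.mem_ofList P a).mpr ha)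
  simp only [hS]
  rw [PySem.List.foldl_add]
  rw [zero_add]
  rw [pv_sum_comm nums P (fun z k => if PySem.Int.band z k = 0 then (1 : Int) else 0)]
  rw [hP, List.map_flatMap]
  simp only [List.map_map, Function.comp_def]
  simp only [pv_sum_flatMap]
  refine congrArg List.sum (List.map_congr_left (fun x _ => ?_))
  refine congrArg List.sum (List.map_congr_left (fun y _ => ?_))
  refine congrArg List.sum (List.map_congr_left (fun z _ => ?_))
  rw [PySem.Int.band_comm]
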